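-- pv_equiv track=rewrite | github.com/jjyAmongCookie/ai_midterm_project | predict.py | get_word_dict
-- ===== SOURCE A (Python) =====
-- def get_word_dict(train_data,dev_data):
--     word_set=set()
--     dict={}
--     # cnt储存字的位置
--     cnt=0
--     for data in [train_data,dev_data]:
--         for v in data:
--             # 句子1和句子2
--             for s in [v[1],v[2]]:
--                 for word in s:
--                     if word not in word_set:
--                         word_set.add(word)
--                         dict[word]=cnt
--                         cnt+=1
--     return dict
-- ===== SOURCE B (Python) =====
-- def get_word_dict(train_data, dev_data):
--     flat = [w for data in (train_data, dev_data)
--               for v in data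
--               for s in (v[1], v[2])
--               for w in s]
--     first = {}
--     for i, w in reversed(list(enumerate(flat))):
--         first[w] = i
--     return {w: rank for rank, (w, _) in enumerate(sorted(first.items(), key=lambda p: p[1]))}
-- ===== Notes on version B (the rewrite author's own statement) =====
-- stated objective: alternative
-- what changed: A's single fused forward pass (membership set + running counter) is replaced by a position-based pipeline: one backward overwrite pass records each word's first-occurrence position, then the (word, position) pairs are sorted by position and ranked by enumerate.
import Mathlib
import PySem

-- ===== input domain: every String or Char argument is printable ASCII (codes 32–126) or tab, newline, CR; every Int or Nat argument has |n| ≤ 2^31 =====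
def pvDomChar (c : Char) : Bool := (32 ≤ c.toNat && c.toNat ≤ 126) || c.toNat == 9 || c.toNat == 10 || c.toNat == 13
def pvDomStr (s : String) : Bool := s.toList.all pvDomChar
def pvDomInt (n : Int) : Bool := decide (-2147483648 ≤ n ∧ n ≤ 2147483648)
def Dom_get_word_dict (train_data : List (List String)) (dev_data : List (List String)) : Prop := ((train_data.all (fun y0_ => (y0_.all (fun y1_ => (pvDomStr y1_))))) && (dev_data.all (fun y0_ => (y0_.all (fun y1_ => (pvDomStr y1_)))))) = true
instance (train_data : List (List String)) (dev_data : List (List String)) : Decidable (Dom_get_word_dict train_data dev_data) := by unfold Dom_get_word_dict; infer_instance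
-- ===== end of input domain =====

-- B replaces A's fused forward pass (membership set + running counter) with a position-based
-- algorithm: record each word's FIRST occurrence position by a single backward overwrite pass,
-- then sort the (word, position) pairs by position and rank them (same idea, different mechanism).

-- ===== PORT A =====
-- A's loop body: membership test on the set, then record the word with the next counter value.
def wdStep (st : PySem.Set String × PySem.Dict String Int × Int) (w : String) :
    PySem.Set String × PySem.Dict String Int × Int :=
  if st.1.contains w then st else (st.1.add w, st.2.1.insert w st.2.2, st.2.2 + 1)

-- Port of A: one fused pass over [train_data, dev_data] / each datum's v[1], v[2] / each character,
-- threading (word_set, dict, cnt); 'for word in s' iterates the CHARACTERS of the string s.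
def get_word_dict (train_data : List (List String)) (dev_data : List (List String)) : List (String × Int) :=
  ([train_data, dev_data].foldl (fun st data =>
      data.foldl (fun st v =>
        [PySem.List.pyGetD v 1 "", PySem.List.pyGetD v 2 ""].foldl (fun st s =>
          s.toList.foldl (fun st c => wdStep st c.toString) st) st) st)
      (PySem.Set.empty, PySem.Dict.empty, 0)).2.1.items

-- ===== PORT B =====
-- Port of B: flatten all characters into one list; walk reversed(list(enumerate(flat)))
-- overwriting first[w] = i, so the surviving value is each word's FIRST position;
-- sort the items by that position and replace positions by their rank via enumerate.
def get_word_dict_alt (train_data : List (List String)) (dev_data : List (List String)) : List (String × Int) :=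
  (PySem.List.enumerate (PySem.List.sorted
    (((PySem.List.enumerate ([train_data, dev_data].flatMap (fun data =>
        data.flatMap (fun v =>
          [PySem.List.pyGetD v 1 "", PySem.List.pyGetD v 2 ""].flatMap (fun s =>
            s.toList.map (fun c => c.toString)))))).reverse.foldl
      (fun d p => d.insert p.2 p.1) PySem.Dict.empty).items) (fun p => p.2))).map
    (fun p => (p.2.1, p.1))

-- ===== PRECONDITION & SPEC =====
-- Pre_ excludes exactly the inputs where Python A raises IndexError: some datum v has fewer
-- than 3 elements, so v[1] or v[2] is out of range.
def Pre_get_word_dict (train_data : List (List String)) (dev_data : List (List String)) : Prop :=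
  ∀ v ∈ train_data ++ dev_data, 3 ≤ v.length
instance (train_data : List (List String)) (dev_data : List (List String)) : Decidable (Pre_get_word_dict train_data dev_data) := by unfold Pre_get_word_dict; infer_instance
def pvWitness_get_word_dict : List (List String) × List (List String) :=
  ([["id", "ab", "ca"]], [["id", "bd", ""]])
def Spec_get_word_dict (train_data : List (List String)) (dev_data : List (List String)) (out : List (String × Int)) : Prop := out = get_word_dict_alt train_data dev_data
instance (train_data : List (List String)) (dev_data : List (List String)) (out : List (String × Int)) : Decidable (Spec_get_word_dict train_data dev_data out) := by unfold Spec_get_word_dict; infer_instance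

-- ===== CLAIM (what is proved, stated in full; the proofs are below) =====
def Claim_equal_get_word_dict : Prop := ∀ (train_data : List (List String)) (dev_data : List (List String)), Dom_get_word_dict train_data dev_data → Pre_get_word_dict train_data dev_data → Spec_get_word_dict train_data dev_data (get_word_dict train_data dev_data)

-- ===== LEMMAS AND PROOFS =====

-- fold over a flattened list = nested folds
lemma foldl_flatMap_eq {a b s : Type} (l : List a) (g : a → List b) (f : s → b → s) (init : s) :
    (l.flatMap g).foldl f init = l.foldl (fun st x => (g x).foldl f st) init := by
  induction l generalizing init with
  | nil => rfl
  | cons x xs ih => simp [List.flatMap_cons, List.foldl_append, ih]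

-- the new first occurrences of ws, given the already-seen set S
def uniqFrom (ws : List String) (S : PySem.Set String) : List String :=
  match ws with
  | [] => []
  | w :: rest => if S.contains w then uniqFrom rest S else w :: uniqFrom rest (S.add w)

lemma append_uniqFrom (ws : List String) (S : PySem.Set String) :
    S ++ uniqFrom ws S = ws.foldl PySem.Set.add S := by
  induction ws generalizing S with
  | nil => simp [uniqFrom]
  | cons w rest ih =>
    simp only [uniqFrom, List.foldl_cons]
    by_cases hm : w ∈ S
    · have hc : S.contains w = true := by simpa [PySem.Set.contains] using hm
      have ha : PySem.Set.add S w = S := by simp [PySem.Set.add, hm]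
      rw [hc, if_pos rfl, ha, ih S]
    · have hc : S.contains w = false := by simpa [PySem.Set.contains] using hm
      rw [hc]
      simp only [Bool.false_eq_true, ite_false]
      rw [← ih (S.add w)]
      simp [PySem.Set.add, hm]

lemma uniqFrom_nil_eq_dedup (ws : List String) :
    uniqFrom ws PySem.Set.empty = PySem.List.dedup ws := by
  have := append_uniqFrom ws PySem.Set.empty
  simpa [PySem.Set.empty, PySem.List.dedup_eq_ofList, PySem.Set.ofList_eq_foldl] using this

-- A's fold yields its dict's items as (dedup order, counter) pairs
lemma wd_main (ws : List String) (S : PySem.Set String) (d : PySem.Dict String Int) (n : Int)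
    (hk : d.keys = S) :
    ((ws.foldl wdStep (S, d, n)).2.1).items
      = d.items ++ (PySem.List.enumerate (uniqFrom ws S) n).map (fun p => (p.2, p.1)) := by
  induction ws generalizing S d n with
  | nil => simp [uniqFrom]
  | cons w rest ih =>
    simp only [List.foldl_cons, uniqFrom, wdStep]
    by_cases hm : w ∈ S
    · have hc : S.contains w = true := by simpa [PySem.Set.contains] using hm
      rw [hc]
      simp [ih S d n hk]
    · have hc : S.contains w = false := by simpa [PySem.Set.contains] using hm
      have hdc : d.contains w = false := by
        have h2 : d.contains w = decide (w ∈ d.keys) := PySem.Dict.contains_eq_decide_mem_keys d w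
        rw [h2, hk]
        simpa using hm
      have hit : (d.insert w n).items = d.items ++ [(w, n)] := by
        simp [PySem.Dict.items_insert, hdc]
      have hkeys : (d.insert w n).keys = PySem.Set.add S w := by
        have hks : List.map (fun x => x.1) d.items = S := by rw [← hk]; rfl
        simp only [PySem.Dict.keys, hit, List.map_append, hks]
        simp [PySem.Set.add, hm]
      rw [hc]
      simp only [Bool.false_eq_true, ite_false]
      rw [ih (S.add w) (d.insert w n) (n + 1) hkeys]
      simp [hit, PySem.List.enumerate_cons]

-- elements of uniqFrom are in ws and not yet seen
lemma mem_uniqFrom {ws : List String} {S : PySem.Set String} {a : String}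
    (h : a ∈ uniqFrom ws S) : a ∈ ws ∧ a ∉ S := by
  induction ws generalizing S with
  | nil => simp [uniqFrom] at h
  | cons w rest ih =>
    simp only [uniqFrom] at h
    by_cases hm : w ∈ S
    · have hc : S.contains w = true := by simpa [PySem.Set.contains] using hm
      rw [hc, if_pos rfl] at h
      have := ih h
      exact ⟨List.mem_cons_of_mem _ this.1, this.2⟩
    · have hc : S.contains w = false := by simpa [PySem.Set.contains] using hm
      rw [hc] at h
      simp only [Bool.false_eq_true, ite_false, List.mem_cons] at h
      rcases h with rfl | h
      · exact ⟨List.mem_cons_self, hm⟩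
      · have := ih h
        have hma : a ∉ S := fun hx => this.2 (by simp [PySem.Set.add]; split <;> simp [hx])
        exact ⟨List.mem_cons_of_mem _ this.1, hma⟩

-- dedup lists words in strictly increasing order of first-occurrence position
lemma pairwise_idxOf_uniqFrom (ws : List String) (S : PySem.Set String) :
    (uniqFrom ws S).Pairwise (fun a b => ws.idxOf a < ws.idxOf b) := by
  induction ws generalizing S with
  | nil => simp [uniqFrom]
  | cons w rest ih =>
    simp only [uniqFrom]
    by_cases hm : w ∈ S
    · have hc : S.contains w = true := by simpa [PySem.Set.contains] using hm
      rw [hc, if_pos rfl]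
      refine ((ih S).imp_of_mem ?_)
      intro a b ha hb hlt
      have hna : a ≠ w := fun h => (mem_uniqFrom ha).2 (h ▸ hm)
      have hnb : b ≠ w := fun h => (mem_uniqFrom hb).2 (h ▸ hm)
      rw [List.idxOf_cons_ne _ (Ne.symm hna), List.idxOf_cons_ne _ (Ne.symm hnb)]
      omega
    · have hc : S.contains w = false := by simpa [PySem.Set.contains] using hm
      rw [hc]
      simp only [Bool.false_eq_true, ite_false]
      constructor
      · intro b hb
        have hnb : b ≠ w := fun h => (mem_uniqFrom hb).2 (by simp [PySem.Set.add, h, hm])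
        rw [List.idxOf_cons_self, List.idxOf_cons_ne _ (Ne.symm hnb)]
        omega
      · refine ((ih (S.add w)).imp_of_mem ?_)
        intro a b ha hb hlt
        have hna : a ≠ w := fun h => (mem_uniqFrom ha).2 (by simp [PySem.Set.add, h, hm])
        have hnb : b ≠ w := fun h => (mem_uniqFrom hb).2 (by simp [PySem.Set.add, h, hm])
        rw [List.idxOf_cons_ne _ (Ne.symm hna), List.idxOf_cons_ne _ (Ne.symm hnb)]
        omega

lemma pairwise_idxOf_dedup (ws : List String) :
    (PySem.List.dedup ws).Pairwise (fun a b => ws.idxOf a < ws.idxOf b) := by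
  have := pairwise_idxOf_uniqFrom ws PySem.Set.empty
  rwa [uniqFrom_nil_eq_dedup] at this

-- lookup after B's overwrite loop: the LAST matching pair of l wins
lemma get?_foldl_insert_snd (l : List (Int × String)) (d : PySem.Dict String Int) (w : String) :
    (l.foldl (fun d p => d.insert p.2 p.1) d).get? w
      = ((l.reverse.find? (fun p => p.2 == w)).map (·.1)).or (d.get? w) := by
  induction l generalizing d with
  | nil => simp
  | cons x t ih =>
    simp only [List.foldl_cons, List.reverse_cons, List.find?_append, ih]
    rcases hf : t.reverse.find? (fun p => p.2 == w) with _ | p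
    · by_cases hw : x.2 = w
      · simp [hf, hw, Option.or]
      · simp [hf, PySem.Dict.get?_insert, Ne.symm hw, hw, Option.or]
    · simp [hf, Option.or]

-- find? over enumerate locates the first occurrence
lemma find?_enumerate (l : List String) (s : Int) (w : String) (h : w ∈ l) :
    (PySem.List.enumerate l s).find? (fun p => p.2 == w) = some (s + (l.idxOf w : Int), w) := by
  induction l generalizing s with
  | nil => simp at h
  | cons x t ih =>
    rw [PySem.List.enumerate_cons]
    by_cases hx : x = w
    · subst hx
      simp [List.idxOf_cons_self]
    · have hm : w ∈ t := (List.mem_cons.mp h).resolve_left (fun e => hx e.symm)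
      rw [List.find?_cons_of_neg (by simp [hx])]
      rw [ih (s + 1) hm, List.idxOf_cons_ne t hx]
      congr 2
      push_cast
      ring

-- enumerate of a map keeps the indices and maps the payloads
lemma enumerate_map {α β : Type} (f : α → β) (l : List α) (s : Int) :
    PySem.List.enumerate (l.map f) s = (PySem.List.enumerate l s).map (fun p => (p.1, f p.2)) := by
  induction l generalizing s with
  | nil => simp
  | cons x t ih => simp [PySem.List.enumerate_cons, ih]

-- B's sorted items are exactly the dedup words paired with their first positions
lemma sorted_first_items (flat : List String) :
    PySem.List.sorted (((PySem.List.enumerate flat).reverse.foldl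
        (fun d p => d.insert p.2 p.1) PySem.Dict.empty).items) (fun p => p.2)
      = (PySem.List.dedup flat).map (fun w => (w, (flat.idxOf w : Int))) := by
  set first := (PySem.List.enumerate flat).reverse.foldl
      (fun d p => d.insert p.2 p.1) PySem.Dict.empty with hfirst
  have hnodup : first.keys.Nodup :=
    PySem.Dict.nodup_keys_foldl_insert_key (PySem.List.enumerate flat).reverse
      (fun (p : Int × String) => p.2) (fun _ p => p.1) PySem.Dict.empty
      (by simp [PySem.Dict.keys_empty])
  have hkeys : first.keys = PySem.Set.update PySem.Dict.empty.keys
      ((PySem.List.enumerate flat).reverse.map (fun p => p.2)) :=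
    PySem.Dict.keys_foldl_insert_key (PySem.List.enumerate flat).reverse
      (fun (p : Int × String) => p.2) (fun _ p => p.1) PySem.Dict.empty
  have hkeys_mem : ∀ w, w ∈ first.keys ↔ w ∈ flat := by
    intro w
    rw [hkeys, PySem.Dict.keys_empty]
    rw [List.map_reverse, PySem.List.map_snd_enumerate]
    rw [PySem.Set.mem_update]
    simp
  have hget : ∀ w ∈ flat, first.getD w 0 = (flat.idxOf w : Int) := by
    intro w hw
    rw [hfirst, PySem.Dict.getD_eq_get?_getD, get?_foldl_insert_snd, List.reverse_reverse,
      find?_enumerate flat 0 w hw]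
    simp [Option.or]
  have hitems : first.items = first.keys.map (fun k => (k, first.getD k 0)) :=
    PySem.Dict.items_eq_map_keys first hnodup 0
  have hperm : ((PySem.List.dedup flat).map (fun w => (w, (flat.idxOf w : Int)))).Perm first.items := by
    have hkp : (PySem.List.dedup flat).Perm first.keys := by
      rw [List.perm_ext_iff_of_nodup (PySem.List.nodup_dedup flat) hnodup]
      intro a
      rw [PySem.List.mem_dedup, hkeys_mem]
    have : first.items = first.keys.map (fun k => (k, (flat.idxOf k : Int))) := by
      rw [hitems]
      apply List.map_congr_left
      intro k hk
      rw [hget k ((hkeys_mem k).mp hk)]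
    rw [this]
    exact hkp.map _
  have hpw : (((PySem.List.dedup flat).map (fun w => (w, (flat.idxOf w : Int))))).Pairwise
      (fun a b => a.2 < b.2) := by
    rw [List.pairwise_map]
    refine (pairwise_idxOf_dedup flat).imp ?_
    intro a b h
    show (flat.idxOf a : Int) < (flat.idxOf b : Int)
    exact_mod_cast h
  exact PySem.List.sorted_eq_of_perm_of_pairwise_lt _ _ _ hperm hpw

-- A's fused pass and B's position-sort pipeline agree on any flattened word list
lemma core_eq (flat : List String) :
    (flat.foldl wdStep (PySem.Set.empty, PySem.Dict.empty, 0)).2.1.items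
      = (PySem.List.enumerate (PySem.List.sorted
          (((PySem.List.enumerate flat).reverse.foldl
            (fun d p => d.insert p.2 p.1) PySem.Dict.empty).items) (fun p => p.2))).map
          (fun p => (p.2.1, p.1)) := by
  rw [sorted_first_items flat, enumerate_map]
  have hA := wd_main flat PySem.Set.empty PySem.Dict.empty 0 rfl
  rw [uniqFrom_nil_eq_dedup] at hA
  rw [hA]
  simp [List.map_map, Function.comp, PySem.Dict.empty]

-- ===== VERDICT (by name: the statement is the Claim_ definition above) =====
theorem get_word_dict_spec : Claim_equal_get_word_dict := by
  intro train_data dev_data _ _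
  unfold Spec_get_word_dict get_word_dict get_word_dict_alt
  have h := core_eq ([train_data, dev_data].flatMap (fun data =>
      data.flatMap (fun v =>
        [PySem.List.pyGetD v 1 "", PySem.List.pyGetD v 2 ""].flatMap (fun s =>
          s.toList.map (fun c => c.toString)))))
  simp only [foldl_flatMap_eq, List.foldl_map] at h
  exact h
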